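-- pv_equiv track=rewrite | github.com/lettifay/LintCodeSolutions | easy/39.Recover_Rotated_Sorted_Array.py | recoverRotatedSortedArray
-- ===== SOURCE A (Python) =====
-- def recoverRotatedSortedArray(nums):
--     if nums == None:
--         return None
--     if len(nums) == 1:
--         return nums
--
--     for n in range(1,len(nums)):
--         if nums[n] < nums[0]:
--             nums[-n:],nums[:(len(nums)-n)] = nums[:n],nums[n:]
--             break
--     return nums
-- ===== SOURCE B (Python) =====
-- def recoverRotatedSortedArray(nums):
--     if nums == None:
--         return None
--     if len(nums) == 1:
--         return nums
--
--     def _reverse(lo, hi):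
--         # classic in-place segment reversal by end-swaps
--         while lo < hi:
--             nums[lo], nums[hi] = nums[hi], nums[lo]
--             lo += 1
--             hi -= 1
--
--     for n in range(1, len(nums)):
--         if nums[n] < nums[0]:
--             _reverse(0, n - 1)
--             _reverse(n, len(nums) - 1)
--             _reverse(0, len(nums) - 1)
--             break
--     return nums
-- ===== Notes on version B (the rewrite author's own statement) =====
-- stated objective: alternative
-- what changed: The slice-assignment rebuild at the pivot is replaced by the classic in-place three-reversal rotation (reverse nums[:n], reverse nums[n:], reverse the whole list) done with explicit end-swap loops, with no temporary slice copies.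
import Mathlib
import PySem

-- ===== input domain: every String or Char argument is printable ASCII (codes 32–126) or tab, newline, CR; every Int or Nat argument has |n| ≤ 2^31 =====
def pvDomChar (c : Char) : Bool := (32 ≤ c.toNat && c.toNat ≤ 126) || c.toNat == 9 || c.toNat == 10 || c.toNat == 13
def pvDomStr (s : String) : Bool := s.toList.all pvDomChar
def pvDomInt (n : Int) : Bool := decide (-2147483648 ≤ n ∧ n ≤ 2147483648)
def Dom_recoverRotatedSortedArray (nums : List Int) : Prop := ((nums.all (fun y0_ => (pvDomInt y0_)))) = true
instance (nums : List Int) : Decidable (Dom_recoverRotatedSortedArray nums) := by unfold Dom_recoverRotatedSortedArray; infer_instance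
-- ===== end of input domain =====

-- B replaces A's slice-assignment rebuild at the pivot with the classic in-place three-reversal
-- rotation done by end-swap loops (same return value; both Pythons mutate the list in place).

-- ===== PORT A =====
-- loop 'for n in range(1, len(nums))' with break: recursion on n; the pivot branch transliterates
-- 'nums[-n:],nums[:(len(nums)-n)] = nums[:n],nums[n:]' (RHS tuple read first, then the two
-- equal-length slice assignments left to right, written as take/drop ++).
def aLoop (nums : List Int) (n : Nat) : List Int :=
  if _h : n < nums.length then
    if nums[n]! < nums[0]! then
      let rhs1 := PySem.List.slice nums none (some (n : Int))      -- nums[:n]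
      let rhs2 := PySem.List.slice nums (some (n : Int)) none      -- nums[n:]
      let t1 := nums.take (nums.length - n) ++ rhs1                -- nums[-n:] = rhs1
      rhs2 ++ t1.drop (nums.length - n)                            -- nums[:len-n] = rhs2
    else aLoop nums (n + 1)
  else nums
termination_by nums.length - n

-- 'if nums == None' cannot fire for a list value; then the len-1 guard, then the loop.
def recoverRotatedSortedArray (nums : List Int) : List Int :=
  if nums.length = 1 then nums else aLoop nums 1

-- ===== PORT B =====
-- 'nums[lo], nums[hi] = nums[hi], nums[lo]' : simultaneous read, then the two writes.
def pySwap (xs : List Int) (lo hi : Nat) : List Int :=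
  (xs.set lo xs[hi]!).set hi xs[lo]!

-- the 'while lo < hi' end-swap loop of B's _reverse helper
def revSwap (xs : List Int) (lo hi : Nat) : List Int :=
  if lo < hi then revSwap (pySwap xs lo hi) (lo + 1) (hi - 1) else xs
termination_by hi - lo

-- B's scan loop, with the three _reverse calls at the pivot
def bLoop (nums : List Int) (n : Nat) : List Int :=
  if _h : n < nums.length then
    if nums[n]! < nums[0]! then
      revSwap (revSwap (revSwap nums 0 (n - 1)) n (nums.length - 1)) 0 (nums.length - 1)
    else bLoop nums (n + 1)
  else nums
termination_by nums.length - n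

def recoverRotatedSortedArray_alt (nums : List Int) : List Int :=
  if nums.length = 1 then nums else bLoop nums 1

-- ===== PRECONDITION & SPEC =====
def Spec_recoverRotatedSortedArray (nums : List Int) (out : List Int) : Prop := out = recoverRotatedSortedArray_alt nums
instance (nums : List Int) (out : List Int) : Decidable (Spec_recoverRotatedSortedArray nums out) := by unfold Spec_recoverRotatedSortedArray; infer_instance

-- ===== CLAIM (what is proved, stated in full; the proofs are below) =====
def Claim_equal_recoverRotatedSortedArray : Prop := ∀ (nums : List Int), Dom_recoverRotatedSortedArray nums → Spec_recoverRotatedSortedArray nums (recoverRotatedSortedArray nums)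

-- ===== LEMMAS AND PROOFS =====

theorem length_pySwap (xs : List Int) (lo hi : Nat) : (pySwap xs lo hi).length = xs.length := by
  simp [pySwap]

theorem length_revSwap (xs : List Int) (lo hi : Nat) : (revSwap xs lo hi).length = xs.length := by
  induction xs, lo, hi using revSwap.induct with
  | case1 xs lo hi h ih => rw [revSwap]; simp [h, ih, length_pySwap]
  | case2 xs lo hi h => rw [revSwap]; simp [h]

theorem pySwap_getElem? (xs : List Int) (lo hi j : Nat) (hlo : lo < xs.length) (hhi : hi < xs.length) :
    (pySwap xs lo hi)[j]? = if j = hi then xs[lo]? else if j = lo then xs[hi]? else xs[j]? := by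
  have e1 : xs[lo]! = xs[lo] := getElem!_pos xs lo hlo
  have e2 : xs[hi]! = xs[hi] := getElem!_pos xs hi hhi
  by_cases hj1 : j = hi
  · subst hj1
    simp [pySwap, e1, hhi, hlo]
  · by_cases hj2 : j = lo
    · subst hj2
      simp [pySwap, e2, hlo, hhi, Ne.symm hj1, hj1]
    · simp [pySwap, Ne.symm hj1, Ne.symm hj2, hj1, hj2]

-- the end-swap loop reverses the segment [lo, hi], elementwise characterisation
theorem revSwap_getElem? (xs : List Int) (lo hi : Nat) (hhi : hi < xs.length)
    (hlohi : lo ≤ hi + 1) (i : Nat) :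
    (revSwap xs lo hi)[i]? = if lo ≤ i ∧ i ≤ hi then xs[lo + hi - i]? else xs[i]? := by
  induction xs, lo, hi using revSwap.induct generalizing i with
  | case1 xs lo hi h ih =>
    rw [revSwap]; simp only [h, if_true]
    have hlen : (pySwap xs lo hi).length = xs.length := length_pySwap ..
    rw [ih (by omega) (by omega)]
    rw [pySwap_getElem? xs lo hi (lo + 1 + (hi - 1) - i) (by omega) hhi,
        pySwap_getElem? xs lo hi i (by omega) hhi]
    split_ifs <;> first
      | rfl
      | omega
      | (congr 1; omega)
  | case2 xs lo hi h =>
    rw [revSwap]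
    simp only [h, if_false]
    split_ifs with hc
    · congr 1; omega
    · rfl

-- the three reversals at pivot n produce exactly the rotation nums[n:] ++ nums[:n]
theorem threeRev_eq (xs : List Int) (n : Nat) (hn : 1 ≤ n) (hL : n < xs.length) :
    revSwap (revSwap (revSwap xs 0 (n - 1)) n (xs.length - 1)) 0 (xs.length - 1)
      = xs.drop n ++ xs.take n := by
  have l1 : (revSwap xs 0 (n - 1)).length = xs.length := length_revSwap ..
  have l2 : (revSwap (revSwap xs 0 (n - 1)) n (xs.length - 1)).length = xs.length := by
    rw [length_revSwap, l1]
  apply List.ext_getElem?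
  intro i
  rw [revSwap_getElem? _ 0 (xs.length - 1) (by omega) (by omega) i]
  simp only [show ∀ j, (revSwap (revSwap xs 0 (n - 1)) n (xs.length - 1))[j]?
        = if n ≤ j ∧ j ≤ xs.length - 1 then (revSwap xs 0 (n - 1))[n + (xs.length - 1) - j]?
          else (revSwap xs 0 (n - 1))[j]?
      from fun j => revSwap_getElem? _ n (xs.length - 1) (by omega) (by omega) j,
    show ∀ j, (revSwap xs 0 (n - 1))[j]?
        = if 0 ≤ j ∧ j ≤ n - 1 then xs[0 + (n - 1) - j]? else xs[j]?
      from fun j => revSwap_getElem? xs 0 (n - 1) (by omega) (by omega) j]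
  simp only [List.getElem?_append, List.length_drop, List.getElem?_drop, List.getElem?_take]
  split_ifs <;> first
    | rfl
    | omega
    | (congr 1; omega)
    | (exact List.getElem?_eq_none (by omega))

-- A's pivot branch also equals that rotation
theorem aBody_eq (xs : List Int) (n : Nat) (hL : n < xs.length) :
    PySem.List.slice xs (some (n : Int)) none ++
      ((xs.take (xs.length - n) ++ PySem.List.slice xs none (some (n : Int))).drop (xs.length - n))
      = xs.drop n ++ xs.take n := by
  rw [PySem.List.slice_from_natCast, PySem.List.slice_to_natCast]
  have h : (xs.take (xs.length - n)).length = xs.length - n := by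
    simp
  rw [List.drop_append_of_le_length (by omega)]
  simp [h]

theorem loop_eq (nums : List Int) (n : Nat) (hn : 1 ≤ n) : aLoop nums n = bLoop nums n := by
  induction n using aLoop.induct (nums := nums) with
  | case1 n h hc =>
    rw [aLoop, bLoop]
    simp only [h, dif_pos, hc, if_pos]
    rw [threeRev_eq nums n hn h]
    exact aBody_eq nums n h
  | case2 n h hc ih =>
    rw [aLoop, bLoop]
    simp only [h, dif_pos, hc, if_neg]
    exact ih (by omega)
  | case3 n h =>
    rw [aLoop, bLoop]
    simp [h]

-- ===== VERDICT (by name: the statement is the Claim_ definition above) =====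
theorem recoverRotatedSortedArray_spec : Claim_equal_recoverRotatedSortedArray := by
  intro nums _
  unfold Spec_recoverRotatedSortedArray recoverRotatedSortedArray recoverRotatedSortedArray_alt
  split_ifs
  · rfl
  · exact loop_eq nums 1 le_rfl
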